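-- pv_equiv track=rewrite | github.com/SuhJaeHo/algorithm | Programmers/Complete/Lv2/전력망을 둘로 나누기.py | dfs
-- ===== SOURCE A (Python) =====
-- def dfs(point, connectPointsInfo, visited, exclude):
--     acc = 1
--     visited[point] = True
--     [a, b] = exclude
--
--     nextPointList = connectPointsInfo[point]
--
--     for nextPoint in nextPointList:
--         if not visited[nextPoint]:
--             if not ((point == a and nextPoint == b) or (point == b and nextPoint == a)):
--                 acc += dfs(nextPoint, connectPointsInfo, visited, exclude)
--
--     return acc
-- ===== SOURCE B (Python) =====
-- def dfs(point, connectPointsInfo, visited, exclude):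
--     [a, b] = exclude
--     visited[point] = True
--     count = 1
--     stack = [(point, connectPointsInfo[point])]
--     while stack:
--         node, rest = stack.pop()
--         if not rest:
--             continue
--         nb, rest = rest[0], rest[1:]
--         stack.append((node, rest))
--         if not visited[nb] and not ((node == a and nb == b) or (node == b and nb == a)):
--             visited[nb] = True
--             count += 1
--             stack.append((nb, connectPointsInfo[nb]))
--     return count
-- ===== Notes on version B (the rewrite author's own statement) =====
-- stated objective: alternative
-- what changed: The recursive DFS is replaced by an iterative DFS driven by an explicit stack of (node, remaining-neighbours) frames, with the count kept in an accumulator instead of summed over recursive returns; B avoids Python's recursion depth limit.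
import Mathlib
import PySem

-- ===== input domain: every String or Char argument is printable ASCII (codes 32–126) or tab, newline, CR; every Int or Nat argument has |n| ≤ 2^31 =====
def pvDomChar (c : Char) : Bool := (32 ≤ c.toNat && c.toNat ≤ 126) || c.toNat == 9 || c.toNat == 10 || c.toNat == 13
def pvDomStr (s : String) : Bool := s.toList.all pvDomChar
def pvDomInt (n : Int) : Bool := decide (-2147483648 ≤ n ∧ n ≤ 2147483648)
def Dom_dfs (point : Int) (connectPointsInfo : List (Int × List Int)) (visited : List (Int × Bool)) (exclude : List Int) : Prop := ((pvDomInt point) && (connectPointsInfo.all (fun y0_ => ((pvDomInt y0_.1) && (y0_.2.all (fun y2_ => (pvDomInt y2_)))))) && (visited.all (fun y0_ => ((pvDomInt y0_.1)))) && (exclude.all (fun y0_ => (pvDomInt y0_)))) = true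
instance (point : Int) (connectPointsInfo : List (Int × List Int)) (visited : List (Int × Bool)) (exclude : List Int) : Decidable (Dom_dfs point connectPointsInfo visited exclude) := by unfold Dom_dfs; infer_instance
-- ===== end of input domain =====

-- B replaces A's recursive DFS by an iterative DFS over an explicit stack of (node, remaining-neighbours)
-- frames (objective: alternative decomposition, no recursion). Both Pythons mutate `visited` identically;
-- the theorems below are about the RETURN value (the count) only.

-- ===== PORT A =====
-- A's recursion, fueled (the fuel is only a totality guard; it is proved sufficient below).
-- `visited[p] = True` → Dict.insert; `connectPointsInfo[p]` / `visited[p]` reads use getD with a default,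
-- exact wherever Python does not raise KeyError (Pre_ excludes the raising inputs).
def pvGoA (info : PySem.Dict Int (List Int)) (a b : Int) : Nat → Int → PySem.Dict Int Bool → Int × PySem.Dict Int Bool
  | 0, _, vis => (0, vis)
  | f+1, point, vis =>
    (info.getD point []).foldl
      (fun s nextPoint =>
        if !(s.2.getD nextPoint false) then
          if !((point == a && nextPoint == b) || (point == b && nextPoint == a)) then
            let r := pvGoA info a b f nextPoint s.2
            (s.1 + r.1, r.2)
          else s
        else s)
      (1, vis.insert point true)

def dfs (point : Int) (connectPointsInfo : List (Int × List Int)) (visited : List (Int × Bool)) (exclude : List Int) : Int :=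
  match exclude with
  | [a, b] =>
    let info := PySem.Dict.ofList connectPointsInfo
    let vis := PySem.Dict.ofList visited
    (pvGoA info a b ((info.values.flatMap id).length + 1) point vis).1
  | _ => 0  -- Python raises ValueError unpacking `[a, b] = exclude`; outside Pre_

-- ===== PORT B =====
-- Source B's while-loop; the Lean list holds the Python stack top-first ((node, rest) :: stack ↔ stack.pop()).
-- Fuel is only a totality guard (the Python loop has none); proved sufficient below.
def pvLoopB (info : PySem.Dict Int (List Int)) (a b : Int) : Nat → List (Int × List Int) → PySem.Dict Int Bool → Int → Int × PySem.Dict Int Bool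
  | 0, _, vis, count => (count, vis)
  | _+1, [], vis, count => (count, vis)
  | f+1, (node, rest) :: stack, vis, count =>
    match rest with
    | [] => pvLoopB info a b f stack vis count
    | nb :: rest' =>
      if !(vis.getD nb false) && !((node == a && nb == b) || (node == b && nb == a)) then
        pvLoopB info a b f ((nb, info.getD nb []) :: (node, rest') :: stack) (vis.insert nb true) (count + 1)
      else
        pvLoopB info a b f ((node, rest') :: stack) vis count

def dfs_alt (point : Int) (connectPointsInfo : List (Int × List Int)) (visited : List (Int × Bool)) (exclude : List Int) : Int :=
  if exclude.length = 2 then  -- `[a, b] = exclude`: len-2 guard + components (Python raises ValueError otherwise; outside Pre_)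
    let a := exclude.getD 0 0
    let b := exclude.getD 1 0
    let info := PySem.Dict.ofList connectPointsInfo
    let vis := PySem.Dict.ofList visited
    (pvLoopB info a b (((info.values.flatMap id).length + 2) * ((info.values.flatMap id).length + 2))
      [(point, info.getD point [])] (vis.insert point true) 1).1
  else 0

-- ===== PRECONDITION & SPEC =====
-- Pre_ excludes exactly the inputs on which Python A raises: ValueError when exclude does not have
-- length 2, and KeyError when the traversal reads a missing key — i.e. when some node of the expansion
-- closure pvExpand (the nodes A visits) is not a key of connectPointsInfo, or one of their listed
-- neighbours is neither a key of visited nor the start point (which A marks into visited before any read).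
-- pvExpand: the nodes A visits = closure of {point} under following non-excluded edges into
-- initially-unvisited keys of visited (one monotone step, iterated enough times to reach the fixpoint).
def pvExpand (connectPointsInfo : List (Int × List Int)) (visited : List (Int × Bool)) (a b point : Int) : List Int :=
  (fun R => (R ++ R.flatMap (fun x =>
      ((PySem.Dict.ofList connectPointsInfo).getD x []).filter (fun nb =>
        (PySem.Dict.ofList visited).contains nb && !(PySem.Dict.ofList visited).getD nb false
        && !(nb == point)
        && !((x == a && nb == b) || (x == b && nb == a))))).dedup)^[(connectPointsInfo.flatMap (fun p => p.2)).length + 1] [point]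

def Pre_dfs (point : Int) (connectPointsInfo : List (Int × List Int)) (visited : List (Int × Bool)) (exclude : List Int) : Prop :=
  exclude.length = 2 ∧
  ∀ x ∈ pvExpand connectPointsInfo visited (exclude.getD 0 0) (exclude.getD 1 0) point,
    (PySem.Dict.ofList connectPointsInfo).contains x = true ∧
    ∀ nb ∈ (PySem.Dict.ofList connectPointsInfo).getD x [],
      ((PySem.Dict.ofList visited).contains nb || (nb == point)) = true
instance (point : Int) (connectPointsInfo : List (Int × List Int)) (visited : List (Int × Bool)) (exclude : List Int) : Decidable (Pre_dfs point connectPointsInfo visited exclude) := by unfold Pre_dfs; infer_instance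

def pvWitness_dfs : Int × (List (Int × List Int)) × (List (Int × Bool)) × List Int :=
  (0, [(0, [1]), (1, [0, 2]), (2, [1])], [(0, false), (1, false), (2, false)], [1, 2])

def Spec_dfs (point : Int) (connectPointsInfo : List (Int × List Int)) (visited : List (Int × Bool)) (exclude : List Int) (out : Int) : Prop := out = dfs_alt point connectPointsInfo visited exclude
instance (point : Int) (connectPointsInfo : List (Int × List Int)) (visited : List (Int × Bool)) (exclude : List Int) (out : Int) : Decidable (Spec_dfs point connectPointsInfo visited exclude out) := by unfold Spec_dfs; infer_instance

-- ===== CLAIM (what is proved, stated in full; the proofs are below) =====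
def Claim_equal_dfs : Prop := ∀ (point : Int) (connectPointsInfo : List (Int × List Int)) (visited : List (Int × Bool)) (exclude : List Int), Dom_dfs point connectPointsInfo visited exclude → Pre_dfs point connectPointsInfo visited exclude → Spec_dfs point connectPointsInfo visited exclude (dfs point connectPointsInfo visited exclude)

-- ===== LEMMAS AND PROOFS =====

-- the set of all listed neighbour values and its size; the decreasing measure pvMu counts unmarked ones
def pvU (info : PySem.Dict Int (List Int)) : Finset Int := (info.values.flatMap id).toFinset
def pvT (info : PySem.Dict Int (List Int)) : Nat := (info.values.flatMap id).length
def pvMu (info : PySem.Dict Int (List Int)) (vis : PySem.Dict Int Bool) : Nat :=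
  ((pvU info).filter (fun u => vis.getD u false = false)).card

-- instrumented simulation of A's neighbour fold at child fuel f over `rest`, from dict `vis`:
-- returns (number of loop iterations B spends on the frame (x, rest), count A adds, final dict,
--          ok = the run never hit fuel 0)
def pvInst (info : PySem.Dict Int (List Int)) (a b : Int) : Nat → Int → List Int → PySem.Dict Int Bool → Nat × Int × PySem.Dict Int Bool × Bool
  | _, _, [], vis => (1, 0, vis, true)
  | f, x, nb :: rs, vis =>
    if !(vis.getD nb false) && !((x == a && nb == b) || (x == b && nb == a)) then
      match f with
      | 0 => let r := pvInst info a b 0 x rs vis; (0, r.2.1, r.2.2.1, false)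
      | f'+1 =>
        let rc := pvInst info a b f' nb (info.getD nb []) (vis.insert nb true)
        let r := pvInst info a b (f'+1) x rs rc.2.2.1
        (1 + rc.1 + r.1, 1 + rc.2.1 + r.2.1, r.2.2.1, rc.2.2.2 && r.2.2.2)
    else
      let r := pvInst info a b f x rs vis
      (r.1 + 1, r.2.1, r.2.2.1, r.2.2.2)
  termination_by f _ rest _ => (f, rest.length)

-- A's fold body as a named function
def pvStepA (info : PySem.Dict Int (List Int)) (a b : Int) (f : Nat) (point : Int) : (Int × PySem.Dict Int Bool) → Int → (Int × PySem.Dict Int Bool) :=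
  fun s nextPoint =>
    if !(s.2.getD nextPoint false) then
      if !((point == a && nextPoint == b) || (point == b && nextPoint == a)) then
        let r := pvGoA info a b f nextPoint s.2
        (s.1 + r.1, r.2)
      else s
    else s

theorem pvGoA_succ (info : PySem.Dict Int (List Int)) (a b : Int) (f : Nat) (point : Int) (vis : PySem.Dict Int Bool) :
    pvGoA info a b (f+1) point vis = (info.getD point []).foldl (pvStepA info a b f point) (1, vis.insert point true) := by
  unfold pvGoA pvStepA
  rfl


-- projection: A's fold is the (count, dict) part of pvInst
theorem pvInst_spec (info : PySem.Dict Int (List Int)) (a b : Int) :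
    ∀ (f : Nat) (x : Int) (rest : List Int) (vis : PySem.Dict Int Bool) (k : Int),
    rest.foldl (pvStepA info a b f x) (k, vis)
      = (k + (pvInst info a b f x rest vis).2.1, (pvInst info a b f x rest vis).2.2.1) := by
  intro f x rest vis
  induction f, x, rest, vis using pvInst.induct info a b with
  | case1 f x vis => intro k; simp [pvInst]
  | case2 x nb rs vis hc ih =>
    intro k
    obtain ⟨h1, h2⟩ := Bool.and_eq_true_iff.1 hc
    simp only [pvInst, hc, if_pos, List.foldl_cons]
    have hstep : pvStepA info a b 0 x (k, vis) nb = (k, vis) := by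
      simp [pvStepA, h1, h2, pvGoA]
    rw [hstep, ih k]
  | case3 x nb rs vis hc f' rc ihc ihr =>
    intro k
    obtain ⟨h1, h2⟩ := Bool.and_eq_true_iff.1 hc
    simp only [pvInst, hc, if_pos, List.foldl_cons]
    have hgo : pvGoA info a b (f'+1) nb vis
        = (1 + (pvInst info a b f' nb (info.getD nb []) (vis.insert nb true)).2.1,
           (pvInst info a b f' nb (info.getD nb []) (vis.insert nb true)).2.2.1) := by
      rw [pvGoA_succ, ihc 1]
    have hstep : pvStepA info a b (f'+1) x (k, vis) nb
        = (k + (1 + (pvInst info a b f' nb (info.getD nb []) (vis.insert nb true)).2.1),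
           (pvInst info a b f' nb (info.getD nb []) (vis.insert nb true)).2.2.1) := by
      simp only [pvStepA, h1, h2, if_true]
      rw [hgo]
    rw [hstep, ihr]
    rw [Prod.mk.injEq]
    exact ⟨by ring, rfl⟩
  | case4 f x nb rs vis hc ih =>
    intro k
    have hc' : (!vis.getD nb false && !(x == a && nb == b || x == b && nb == a)) = false := by
      simpa using hc
    rw [pvInst.eq_def]
    simp only [hc', Bool.false_eq_true, if_false]
    have hstep : pvStepA info a b f x (k, vis) nb = (k, vis) := by
      unfold pvStepA
      rcases Bool.and_eq_false_iff.1 hc' with h1 | h2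
      · simp [h1]
      · by_cases hg : vis.getD nb false
        · simp [hg]
        · have h1t : (!vis.getD nb false) = true := by simp [hg]
          rw [h1t, Bool.true_and] at hc'
          simp [h1t, hc']
    simp only [List.foldl_cons, hstep, ih k]

-- marks only grow
theorem pvInst_mono (info : PySem.Dict Int (List Int)) (a b : Int) :
    ∀ (f : Nat) (x : Int) (rest : List Int) (vis : PySem.Dict Int Bool) (u : Int),
    vis.getD u false = true → (pvInst info a b f x rest vis).2.2.1.getD u false = true := by
  intro f x rest vis
  induction f, x, rest, vis using pvInst.induct info a b with
  | case1 f x vis => intro u h; simpa [pvInst] using h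
  | case2 x nb rs vis hc ih =>
    intro u h
    simp only [pvInst, hc, if_pos]
    exact ih u h
  | case3 x nb rs vis hc f' rc ihc ihr =>
    intro u h
    simp only [pvInst, hc, if_pos]
    refine ihr u (ihc u ?_)
    rw [PySem.Dict.getD_insert]
    split <;> simp [h]
  | case4 f x nb rs vis hc ih =>
    intro u h
    have hc' : (!vis.getD nb false && !(x == a && nb == b || x == b && nb == a)) = false := by
      simpa using hc
    rw [pvInst.eq_def]
    simp only [hc', Bool.false_eq_true, if_false]
    exact ih u h

theorem pvU_closed (info : PySem.Dict Int (List Int)) (x nb : Int) (h : nb ∈ info.getD x []) : nb ∈ pvU info := by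
  rcases hq : info.get? x with _ | l
  · rw [PySem.Dict.getD_of_get?_eq_none info [] hq] at h
    simp at h
  · rw [PySem.Dict.getD_of_get?_eq_some info [] hq] at h
    have hit : (x, l) ∈ info.items := PySem.Dict.mem_items_of_get?_eq_some info hq
    have hv : l ∈ info.values := by
      simp only [PySem.Dict.values]
      exact List.mem_map.2 ⟨(x, l), hit, rfl⟩
    simp only [pvU, List.mem_toFinset, List.mem_flatMap]
    exact ⟨l, hv, by simpa using h⟩


theorem pvLen_le_flat (l : List Int) (L : List (List Int)) (h : l ∈ L) :
    l.length ≤ (L.flatMap id).length := by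
  induction L with
  | nil => simp at h
  | cons hd tl ih =>
    simp only [List.flatMap_cons, List.length_append, id]
    rcases List.mem_cons.1 h with rfl | h
    · omega
    · have := ih h
      omega

theorem pvAdj_len (info : PySem.Dict Int (List Int)) (x : Int) : (info.getD x []).length ≤ pvT info := by
  rcases hq : info.get? x with _ | l
  · rw [PySem.Dict.getD_of_get?_eq_none info [] hq]
    simp [pvT]
  · rw [PySem.Dict.getD_of_get?_eq_some info [] hq]
    have hit : (x, l) ∈ info.items := PySem.Dict.mem_items_of_get?_eq_some info hq
    have hv : l ∈ info.values := by
      simp only [PySem.Dict.values]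
      exact List.mem_map.2 ⟨(x, l), hit, rfl⟩
    unfold pvT
    exact pvLen_le_flat l info.values hv


theorem pvMu_insert (info : PySem.Dict Int (List Int)) (vis : PySem.Dict Int Bool) (nb : Int)
    (hU : nb ∈ pvU info) (hv : vis.getD nb false = false) :
    pvMu info (vis.insert nb true) + 1 ≤ pvMu info vis := by
  unfold pvMu
  have hset : (pvU info).filter (fun u => (vis.insert nb true).getD u false = false)
      = ((pvU info).filter (fun u => vis.getD u false = false)).erase nb := by
    ext u
    simp only [Finset.mem_filter, Finset.mem_erase, PySem.Dict.getD_insert]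
    constructor
    · rintro ⟨hu, hg⟩
      by_cases h : u = nb
      · simp [h] at hg
      · rw [if_neg h] at hg
        exact ⟨h, hu, hg⟩
    · rintro ⟨h, hu, hg⟩
      exact ⟨hu, by rw [if_neg h]; exact hg⟩
  rw [hset]
  have hmem : nb ∈ (pvU info).filter (fun u => vis.getD u false = false) :=
    Finset.mem_filter.2 ⟨hU, hv⟩
  rw [Finset.card_erase_of_mem hmem]
  have := Finset.card_pos.2 ⟨nb, hmem⟩
  omega


theorem pvMu_mono (info : PySem.Dict Int (List Int)) (a b : Int) (f : Nat) (x : Int) (rest : List Int) (vis : PySem.Dict Int Bool) :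
    pvMu info (pvInst info a b f x rest vis).2.2.1 ≤ pvMu info vis := by
  unfold pvMu
  apply Finset.card_le_card
  intro u hu
  simp only [Finset.mem_filter] at hu ⊢
  refine ⟨hu.1, ?_⟩
  cases h : vis.getD u false
  · rfl
  · have := pvInst_mono info a b f x rest vis u h
    rw [hu.2] at this
    cases this


-- enough fuel ⇒ A's recursion never hits 0
theorem pvInst_ok (info : PySem.Dict Int (List Int)) (a b : Int) :
    ∀ (f : Nat) (x : Int) (rest : List Int) (vis : PySem.Dict Int Bool),
    (∀ nb ∈ rest, nb ∈ pvU info) → pvMu info vis ≤ f → (pvInst info a b f x rest vis).2.2.2 = true := by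
  intro f x rest vis
  induction f, x, rest, vis using pvInst.induct info a b with
  | case1 f x vis => intro _ _; simp [pvInst]
  | case2 x nb rs vis hc ih =>
    intro hU hμ
    exfalso
    have h1 : vis.getD nb false = false := by
      have := (Bool.and_eq_true_iff.1 hc).1
      simpa using this
    have hm : nb ∈ (pvU info).filter (fun u => vis.getD u false = false) :=
      Finset.mem_filter.2 ⟨hU nb (List.mem_cons_self ..), h1⟩
    have := Finset.card_pos.2 ⟨nb, hm⟩
    unfold pvMu at hμ
    omega
  | case3 x nb rs vis hc f' rc ihc ihr =>
    intro hU hμ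
    have h1 : vis.getD nb false = false := by
      have := (Bool.and_eq_true_iff.1 hc).1
      simpa using this
    have hins := pvMu_insert info vis nb (hU nb (List.mem_cons_self ..)) h1
    simp only [pvInst, hc, if_pos]
    rw [Bool.and_eq_true_iff]
    constructor
    · exact ihc (fun u hu => pvU_closed info nb u hu) (by omega)
    · refine ihr (fun u hu => hU u (List.mem_cons_of_mem _ hu)) ?_
      have hmm := pvMu_mono info a b f' nb (info.getD nb []) (vis.insert nb true)
      have e : pvMu info rc.2.2.1 = pvMu info (pvInst info a b f' nb (info.getD nb []) (vis.insert nb true)).2.2.1 := rfl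
      omega
  | case4 f x nb rs vis hc ih =>
    intro hU hμ
    have hc' : (!vis.getD nb false && !(x == a && nb == b || x == b && nb == a)) = false := by
      simpa using hc
    rw [pvInst.eq_def]
    simp only [hc', Bool.false_eq_true, if_false]
    exact ih (fun u hu => hU u (List.mem_cons_of_mem _ hu)) hμ

-- B's loop spends exactly (pvInst …).1 iterations on a frame
theorem pvCost_bound (info : PySem.Dict Int (List Int)) (a b : Int) :
    ∀ (f : Nat) (x : Int) (rest : List Int) (vis : PySem.Dict Int Bool),
    (∀ nb ∈ rest, nb ∈ pvU info) →
    (pvInst info a b f x rest vis).1 + pvMu info (pvInst info a b f x rest vis).2.2.1 * (pvT info + 1)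
      ≤ pvMu info vis * (pvT info + 1) + rest.length + 1 := by
  intro f x rest vis
  induction f, x, rest, vis using pvInst.induct info a b with
  | case1 f x vis => intro _; simp only [pvInst]; omega
  | case2 x nb rs vis hc ih =>
    intro hU
    simp only [pvInst, hc, if_pos]
    have hmono := pvMu_mono info a b 0 x rs vis
    have hmul : pvMu info (pvInst info a b 0 x rs vis).2.2.1 * (pvT info + 1)
        ≤ pvMu info vis * (pvT info + 1) := Nat.mul_le_mul_right _ hmono
    simp only [List.length_cons]
    omega
  | case3 x nb rs vis hc f' rc ihc ihr =>
    intro hU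
    have h1 : vis.getD nb false = false := by
      have := (Bool.and_eq_true_iff.1 hc).1
      simpa using this
    have hins := pvMu_insert info vis nb (hU nb (List.mem_cons_self ..)) h1
    have hadj := pvAdj_len info nb
    have hc1 := ihc (fun u hu => pvU_closed info nb u hu)
    have hc2 := ihr (fun u hu => hU u (List.mem_cons_of_mem _ hu))
    have hmul : (pvMu info (vis.insert nb true) + 1) * (pvT info + 1)
        ≤ pvMu info vis * (pvT info + 1) := Nat.mul_le_mul_right _ hins
    rw [Nat.add_mul, Nat.one_mul] at hmul
    have hrc : rc = pvInst info a b f' nb (info.getD nb []) (vis.insert nb true) := rfl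
    simp only [hrc] at hc2
    simp only [pvInst, hc, if_pos, List.length_cons]
    omega
  | case4 f x nb rs vis hc ih =>
    intro hU
    have hc' : (!vis.getD nb false && !(x == a && nb == b || x == b && nb == a)) = false := by
      simpa using hc
    rw [pvInst.eq_def]
    simp only [hc', Bool.false_eq_true, if_false]
    have := ih (fun u hu => hU u (List.mem_cons_of_mem _ hu))
    simp only [List.length_cons]
    omega

-- the simulation: B's loop consumes the frame (x, rest) exactly as A's fold does
theorem pvLoopB_cons_nil (info : PySem.Dict Int (List Int)) (a b : Int) (g : Nat) (x : Int)
    (S : List (Int × List Int)) (vis : PySem.Dict Int Bool) (c : Int) :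
    pvLoopB info a b (g+1) ((x, []) :: S) vis c = pvLoopB info a b g S vis c := by
  simp [pvLoopB]

theorem pvLoopB_cons_mark (info : PySem.Dict Int (List Int)) (a b : Int) (g : Nat) (x nb : Int)
    (rs : List Int) (S : List (Int × List Int)) (vis : PySem.Dict Int Bool) (c : Int)
    (h : (!vis.getD nb false && !((x == a && nb == b) || (x == b && nb == a))) = true) :
    pvLoopB info a b (g+1) ((x, nb :: rs) :: S) vis c
      = pvLoopB info a b g ((nb, info.getD nb []) :: (x, rs) :: S) (vis.insert nb true) (c + 1) := by
  simp only [pvLoopB]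
  rw [if_pos h]

theorem pvLoopB_cons_skip (info : PySem.Dict Int (List Int)) (a b : Int) (g : Nat) (x nb : Int)
    (rs : List Int) (S : List (Int × List Int)) (vis : PySem.Dict Int Bool) (c : Int)
    (h : (!vis.getD nb false && !((x == a && nb == b) || (x == b && nb == a))) = false) :
    pvLoopB info a b (g+1) ((x, nb :: rs) :: S) vis c
      = pvLoopB info a b g ((x, rs) :: S) vis c := by
  simp only [pvLoopB]
  rw [if_neg (by simp only [h]; simp)]

theorem pvSim (info : PySem.Dict Int (List Int)) (a b : Int) :
    ∀ (f : Nat) (x : Int) (rest : List Int) (vis : PySem.Dict Int Bool) (c : Int) (S : List (Int × List Int)) (g : Nat),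
    (pvInst info a b f x rest vis).2.2.2 = true →
    pvLoopB info a b ((pvInst info a b f x rest vis).1 + g) ((x, rest) :: S) vis c
      = pvLoopB info a b g S (pvInst info a b f x rest vis).2.2.1 (c + (pvInst info a b f x rest vis).2.1) := by
  intro f x rest vis
  induction f, x, rest, vis using pvInst.induct info a b with
  | case1 f x vis =>
    intro c S g _
    simp only [pvInst]
    rw [Nat.add_comm 1 g, pvLoopB_cons_nil]
    simp
  | case2 x nb rs vis hc ih =>
    intro c S g hok
    simp only [pvInst, hc, if_pos] at hok
    simp at hok
  | case3 x nb rs vis hc f' rc ihc ihr =>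
    intro c S g hok
    have hrc : rc = pvInst info a b f' nb (info.getD nb []) (vis.insert nb true) := rfl
    simp only [pvInst, hc, if_pos, Bool.and_eq_true_iff] at hok ⊢
    obtain ⟨hok1, hok2⟩ := hok
    simp only [hrc] at ihr hok2
    have e : 1 + (pvInst info a b f' nb (info.getD nb []) (vis.insert nb true)).1
        + (pvInst info a b (f'+1) x rs (pvInst info a b f' nb (info.getD nb []) (vis.insert nb true)).2.2.1).1 + g
        = ((pvInst info a b f' nb (info.getD nb []) (vis.insert nb true)).1
           + ((pvInst info a b (f'+1) x rs (pvInst info a b f' nb (info.getD nb []) (vis.insert nb true)).2.2.1).1 + g)) + 1 := by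
      omega
    rw [e, pvLoopB_cons_mark info a b _ x nb rs S vis c hc, ihc _ _ _ hok1, ihr _ _ _ hok2]
    congr 1
    ring
  | case4 f x nb rs vis hc ih =>
    intro c S g hok
    have hc' : (!vis.getD nb false && !(x == a && nb == b || x == b && nb == a)) = false := by
      simpa using hc
    rw [pvInst.eq_def] at hok ⊢
    simp only [hc', Bool.false_eq_true, if_false] at hok ⊢
    have e : (pvInst info a b f x rs vis).1 + 1 + g = ((pvInst info a b f x rs vis).1 + g) + 1 := by omega
    rw [e, pvLoopB_cons_skip info a b _ x nb rs S vis c hc', ih _ _ _ hok]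

theorem pvLoopB_nil (info : PySem.Dict Int (List Int)) (a b : Int) (g : Nat) (vis : PySem.Dict Int Bool) (c : Int) :
    pvLoopB info a b g [] vis c = (c, vis) := by
  cases g <;> simp [pvLoopB]


-- ===== VERDICT (by name: the statement is the Claim_ definition above) =====
theorem dfs_spec : Claim_equal_dfs := by
  intro point cpi visited exclude _ _
  unfold Spec_dfs dfs dfs_alt
  rcases exclude with _ | ⟨a, _ | ⟨b, _ | ⟨c, t⟩⟩⟩
  · simp
  · simp
  case cons.cons.cons =>
    rw [if_neg (by simp)]
  case cons.cons.nil =>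
  rw [if_pos (by simp)]
  simp only [List.getD_cons_zero, List.getD_cons_succ]
  set info := PySem.Dict.ofList cpi with hinfo
  set vis := PySem.Dict.ofList visited with hvis
  set T := (info.values.flatMap id).length with hTdef
  have hTT : T = pvT info := rfl
  have hUadj : ∀ nb ∈ info.getD point [], nb ∈ pvU info := fun nb h => pvU_closed info point nb h
  have hμ : pvMu info (vis.insert point true) ≤ T := by
    have h1 : pvMu info (vis.insert point true) ≤ (pvU info).card := Finset.card_filter_le _ _
    have h2 : (pvU info).card ≤ T := by
      rw [hTT]
      exact List.toFinset_card_le _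
    omega
  have hok := pvInst_ok info a b T point (info.getD point []) (vis.insert point true) hUadj hμ
  have hcost := pvCost_bound info a b T point (info.getD point []) (vis.insert point true) hUadj
  have hadj : (info.getD point []).length ≤ T := by rw [hTT]; exact pvAdj_len info point
  have hmul : pvMu info (vis.insert point true) * (pvT info + 1) ≤ T * (pvT info + 1) :=
    Nat.mul_le_mul_right _ hμ
  have hring : (T+2)*(T+2) = T*(pvT info + 1) + 3*T + 4 := by rw [← hTT]; ring
  have hIb : (pvInst info a b T point (info.getD point []) (vis.insert point true)).1 ≤ (T+2)*(T+2) := by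
    omega
  have hg : (pvInst info a b T point (info.getD point []) (vis.insert point true)).1
      + ((T+2)*(T+2) - (pvInst info a b T point (info.getD point []) (vis.insert point true)).1)
      = (T+2)*(T+2) := by omega
  rw [show T + 1 = Nat.succ T from rfl, pvGoA_succ,
      pvInst_spec info a b T point (info.getD point []) (vis.insert point true) 1,
      ← hg, pvSim info a b T point (info.getD point []) (vis.insert point true) 1 _ _ hok,
      pvLoopB_nil]
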